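-- pv_equiv track=rewrite | github.com/larsnohle/57 | 47/fortysevenChallenge2.py | collect_by_craft
-- ===== SOURCE A (Python) =====
-- NAME = 'name'
--
-- CRAFT = 'craft'
--
-- def collect_by_craft(person_and_craft_list):
--     craft_to_persons_dict = dict()
--     for person_and_craft in person_and_craft_list:
--         person = person_and_craft[NAME]
--         craft = person_and_craft[CRAFT]
--         if craft not in craft_to_persons_dict:
--             persons_for_craft = list()
--             craft_to_persons_dict[craft] = persons_for_craft
--         persons_for_craft = craft_to_persons_dict[craft]
--         persons_for_craft.append(person)
--     return craft_to_persons_dict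
-- ===== SOURCE B (Python) =====
-- NAME = 'name'
--
-- CRAFT = 'craft'
--
-- def collect_by_craft(person_and_craft_list):
--     crafts = []
--     for person_and_craft in person_and_craft_list:
--         craft = person_and_craft[CRAFT]
--         if craft not in crafts:
--             crafts.append(craft)
--     return {craft: [pc[NAME] for pc in person_and_craft_list if pc[CRAFT] == craft]
--             for craft in crafts}
-- ===== Notes on version B (the rewrite author's own statement) =====
-- stated objective: alternative
-- what changed: Replaces A's single-pass dict accumulation by a two-phase shape: one pass collecting the distinct crafts in first-appearance order, then a rescan of the whole input per craft to gather its names.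
import Mathlib
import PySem

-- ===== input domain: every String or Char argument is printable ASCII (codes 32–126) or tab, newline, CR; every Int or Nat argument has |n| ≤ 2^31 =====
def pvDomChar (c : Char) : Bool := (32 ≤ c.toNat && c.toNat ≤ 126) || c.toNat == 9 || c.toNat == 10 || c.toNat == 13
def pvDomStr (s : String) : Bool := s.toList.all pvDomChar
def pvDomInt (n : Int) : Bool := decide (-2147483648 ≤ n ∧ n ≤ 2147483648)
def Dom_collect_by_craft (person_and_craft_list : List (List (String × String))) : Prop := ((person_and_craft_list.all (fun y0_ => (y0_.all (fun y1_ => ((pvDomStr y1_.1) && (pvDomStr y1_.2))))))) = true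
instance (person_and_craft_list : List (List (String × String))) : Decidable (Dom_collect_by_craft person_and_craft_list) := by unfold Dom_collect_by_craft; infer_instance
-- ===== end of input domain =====

-- B replaces A's incremental dict accumulation by a two-phase shape: collect the
-- distinct crafts in first-appearance order, then rescan the input once per craft
-- to gather its names (objective: alternative, not faster).

-- shared element access: person_and_craft[k] on the assoc-list encoding of a dict
-- (first match; '' stands in for Python's KeyError, which Pre_ excludes)
def pvGet (p : List (String × String)) (k : String) : String :=
  ((p.find? (fun kv => kv.1 == k)).map (·.2)).getD ""

-- ===== PORT A =====
def collect_by_craft (person_and_craft_list : List (List (String × String))) : List (String × List String) :=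
  (person_and_craft_list.foldl
    (fun craft_to_persons_dict person_and_craft =>
      let person := pvGet person_and_craft "name"
      let craft := pvGet person_and_craft "craft"
      let d1 := if craft_to_persons_dict.contains craft then craft_to_persons_dict
                else craft_to_persons_dict.insert craft ([] : List String)
      d1.insert craft (d1.getD craft [] ++ [person]))
    PySem.Dict.empty).items

-- ===== PORT B =====
def collect_by_craft_alt (person_and_craft_list : List (List (String × String))) : List (String × List String) :=
  let crafts := person_and_craft_list.foldl
    (fun s person_and_craft => PySem.Set.add s (pvGet person_and_craft "craft"))
    ([] : PySem.Set String)
  crafts.map (fun craft =>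
    (craft, (person_and_craft_list.filter (fun pc => pvGet pc "craft" == craft)).map
              (fun pc => pvGet pc "name")))

-- ===== PRECONDITION & SPEC =====
-- Pre_ excludes exactly the inputs where the Python A raises KeyError: a person
-- record missing the 'name' or 'craft' key.
def Pre_collect_by_craft (person_and_craft_list : List (List (String × String))) : Prop :=
  ∀ p ∈ person_and_craft_list, "name" ∈ p.map (·.1) ∧ "craft" ∈ p.map (·.1)
instance (person_and_craft_list : List (List (String × String))) : Decidable (Pre_collect_by_craft person_and_craft_list) := by unfold Pre_collect_by_craft; infer_instance

def pvWitness_collect_by_craft : (List (List (String × String))) :=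
  [[("name", "Ann"), ("craft", "mason")], [("name", "Bob"), ("craft", "smith")],
   [("name", "Cal"), ("craft", "mason")]]

def Spec_collect_by_craft (person_and_craft_list : List (List (String × String))) (out : List (String × List String)) : Prop := out = collect_by_craft_alt person_and_craft_list
instance (person_and_craft_list : List (List (String × String))) (out : List (String × List String)) : Decidable (Spec_collect_by_craft person_and_craft_list out) := by unfold Spec_collect_by_craft; infer_instance

-- ===== CLAIM (what is proved, stated in full; the proofs are below) =====
def Claim_equal_collect_by_craft : Prop := ∀ (person_and_craft_list : List (List (String × String))), Dom_collect_by_craft person_and_craft_list → Pre_collect_by_craft person_and_craft_list → Spec_collect_by_craft person_and_craft_list (collect_by_craft person_and_craft_list)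

-- ===== LEMMAS AND PROOFS =====

-- A's loop body ('insert [] if absent, then append') is one modify
theorem bodyA_eq_modify (d : PySem.Dict String (List String)) (c n : String) :
    (let d1 := if d.contains c then d else d.insert c ([] : List String)
     d1.insert c (d1.getD c [] ++ [n])) = d.modify c [] (· ++ [n]) := by
  by_cases h : d.contains c
  · simp only [h, if_true]
    simp [PySem.Dict.modify]
  · simp only [h, Bool.false_eq_true, if_false]
    rw [PySem.Dict.getD_insert_self, PySem.Dict.insert_insert_self,
      PySem.Dict.modify, PySem.Dict.getD_of_not_contains d ([] : List String) (by simpa using h)]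

theorem main_eq (xs : List (List (String × String))) :
    collect_by_craft xs = collect_by_craft_alt xs := by
  unfold collect_by_craft collect_by_craft_alt
  have hbody : (fun (d : PySem.Dict String (List String)) (p : List (String × String)) =>
      let person := pvGet p "name"
      let craft := pvGet p "craft"
      let d1 := if d.contains craft then d else d.insert craft ([] : List String)
      d1.insert craft (d1.getD craft [] ++ [person]))
      = fun d p => d.modify (pvGet p "craft") [] (· ++ [pvGet p "name"]) := by
    funext d p
    exact bodyA_eq_modify d (pvGet p "craft") (pvGet p "name")
  rw [hbody]
  -- switch to the list of (craft, name) pairs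
  have hmap : xs.foldl (fun d p => d.modify (pvGet p "craft") [] (· ++ [pvGet p "name"]))
        PySem.Dict.empty
      = (xs.map (fun p => (pvGet p "craft", pvGet p "name"))).foldl
          (fun d q => d.modify q.1 [] (· ++ [q.2])) PySem.Dict.empty := by
    rw [List.foldl_map]
  rw [hmap]
  set pairs := xs.map (fun p => (pvGet p "craft", pvGet p "name")) with hpairs
  have hnd : (pairs.foldl (fun d q => d.modify q.1 [] (· ++ [q.2])) PySem.Dict.empty).keys.Nodup := by
    exact PySem.Dict.nodup_keys_foldl_modify_key pairs Prod.fst [] (fun d q => (· ++ [q.2]))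
      PySem.Dict.empty (by simp [PySem.Dict.keys_empty])
  rw [PySem.Dict.items_eq_map_keys _ hnd []]
  have hkeys : (pairs.foldl (fun d q => d.modify q.1 [] (· ++ [q.2])) PySem.Dict.empty).keys
      = PySem.Set.ofList (pairs.map Prod.fst) := by
    rw [PySem.Dict.keys_foldl_modify_key pairs Prod.fst [] (fun d q => (· ++ [q.2]))
      PySem.Dict.empty]
    simp [PySem.Dict.keys_empty, PySem.Set.update_nil_left]
  have hcrafts : (xs.foldl (fun s p => PySem.Set.add s (pvGet p "craft")) ([] : PySem.Set String))
      = PySem.Set.ofList (pairs.map Prod.fst) := by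
    rw [← PySem.Set.update_map_eq_foldl_add, PySem.Set.update_nil_left, hpairs]
    simp [List.map_map, Function.comp_def]
  rw [hkeys, hcrafts]
  apply List.map_congr_left
  intro c _
  have hgd := PySem.Dict.getD_foldl_modify_append pairs PySem.Dict.empty c
  rw [hgd, PySem.Dict.getD_empty]
  simp only [hpairs, List.filter_map, List.map_map, List.nil_append]
  rfl

-- ===== VERDICT (by name: the statement is the Claim_ definition above) =====
theorem collect_by_craft_spec : Claim_equal_collect_by_craft := by
  intro xs _ _
  unfold Spec_collect_by_craft
  exact main_eq xs
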